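-- pv_equiv track=rewrite | github.com/arthurdysart/HackerRank | programming/algorithms/strings/the_love_letter_mystery/python_source.py | count_palindrome_moves
-- ===== SOURCE A (Python) =====
-- def count_palindrome_moves(s):
--     """
--     Determine minimum character changes for palindrome transformation.
--
--     :param str s: target string
--     :return: minimum moves to transform target string into palindrome
--     :rtype: int
--     """
--     if not s:
--         return 0
--
--     a = list(x for x in s)
--
--     l = 0
--     r = len(a) - 1
--
--     p = 0
--     while l < r:
--
--         if a[l] == a[r]:
--             # No change required
--             l += 1
--             r -= 1
--
--         elif (a[l] < a[r] and
--               a[r] != "a"):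
--             # Modify right character
--             a[r] = chr(ord(a[r]) - 1)
--             p += 1
--
--         elif (a[l] > a[r] and
--               a[l] != "a"):
--             # Modify left character
--             a[l] = chr(ord(a[l]) - 1)
--             p += 1
--
--         else:
--             # Found character less than "a"
--             return -1
--
--     return p
-- ===== SOURCE B (Python) =====
-- def count_palindrome_moves(s):
--     n = len(s)
--     total = 0
--     for i in range(n // 2):
--         x, y = s[i], s[n - 1 - i]
--         lo, hi = (x, y) if x <= y else (y, x)
--         if lo < 'a' <= hi:
--             return -1
--         total += ord(hi) - ord(lo)
--     return total
-- ===== Notes on version B (the rewrite author's own statement) =====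
-- stated objective: faster
-- what changed: B replaces A's in-place simulation that decrements the larger character of each mirrored pair one step at a time with a single arithmetic pass summing ord-differences over the first half of the string (returning -1 when the smaller of a mismatched pair is below 'a' while the larger is >= 'a').
import Mathlib
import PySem

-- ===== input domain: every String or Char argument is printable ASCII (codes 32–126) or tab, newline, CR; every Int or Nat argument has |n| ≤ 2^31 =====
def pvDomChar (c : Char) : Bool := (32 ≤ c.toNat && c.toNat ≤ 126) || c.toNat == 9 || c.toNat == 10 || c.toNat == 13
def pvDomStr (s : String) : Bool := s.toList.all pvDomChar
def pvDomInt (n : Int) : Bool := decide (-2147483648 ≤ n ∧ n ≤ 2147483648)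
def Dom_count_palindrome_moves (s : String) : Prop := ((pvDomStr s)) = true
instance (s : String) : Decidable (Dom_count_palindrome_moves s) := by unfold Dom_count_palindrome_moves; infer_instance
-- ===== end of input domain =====

-- Char/getD helper lemmas (cited by name in pvLoopA's termination proof below)
theorem pv_char_lt {a b : Char} : a < b ↔ a.toNat < b.toNat :=
  Iff.trans Char.lt_def UInt32.lt_iff_toNat_lt

theorem pv_ofNat_le {n : Nat} : (Char.ofNat n).toNat ≤ n := by
  rw [Char.toNat_ofNat]; split <;> omega

theorem pv_getD_set_ne {a : List Char} {i j : Nat} (h : i ≠ j) (v d : Char) :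
    (a.set i v).getD j d = a.getD j d := by
  simp [List.getD, List.getElem?_set_ne h]

theorem pv_getD_set_self {a : List Char} {i : Nat} (h : i < a.length) (v d : Char) :
    (a.set i v).getD i d = v := by
  simp [List.getD, h]

-- B replaces A's one-step-at-a-time character-decrement simulation by a single
-- arithmetic pass over the first half of the string (objective: faster).

-- ===== PORT A =====
-- A's while loop; the state (a, l, r, p) is exactly the Python's; the branch reads
-- a[l], a[r] inline exactly as the Python conditions do. The outer `r < a.length`
-- guard only makes the recursion total: every call reachable from
-- `count_palindrome_moves` (and every recursive call) satisfies it.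
def pvLoopA (a : List Char) (l r : Nat) (p : Int) : Int :=
  if _hr : r < a.length then
    if _h : l < r then
      if a.getD l ' ' = a.getD r ' ' then
        pvLoopA a (l + 1) (r - 1) p
      else if a.getD l ' ' < a.getD r ' ' ∧ a.getD r ' ' ≠ 'a' then
        pvLoopA (a.set r (Char.ofNat ((a.getD r ' ').toNat - 1))) l r (p + 1)
      else if a.getD r ' ' < a.getD l ' ' ∧ a.getD l ' ' ≠ 'a' then
        pvLoopA (a.set l (Char.ofNat ((a.getD l ' ').toNat - 1))) l r (p + 1)
      else
        -1
    else p
  else p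
termination_by (r - l, (a.getD l ' ').toNat + (a.getD r ' ').toNat)
decreasing_by
  · exact Prod.Lex.left _ _ (by omega)
  · apply Prod.Lex.right'
    · omega
    · have hlr : l ≠ r := by omega
      have h1 : ((a.set r (Char.ofNat ((a.getD r ' ').toNat - 1))).getD l ' ').toNat
          = (a.getD l ' ').toNat := by rw [pv_getD_set_ne hlr.symm]
      have h2 : ((a.set r (Char.ofNat ((a.getD r ' ').toNat - 1))).getD r ' ').toNat
          = (Char.ofNat ((a.getD r ' ').toNat - 1)).toNat := by rw [pv_getD_set_self _hr]
      have hpos : 1 ≤ (a.getD r ' ').toNat := by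
        rename_i hne hlt
        have := pv_char_lt.mp hlt.1
        omega
      have h3 : (Char.ofNat ((a.getD r ' ').toNat - 1)).toNat ≤ (a.getD r ' ').toNat - 1 :=
        pv_ofNat_le
      omega
  · apply Prod.Lex.right'
    · omega
    · have hlr : l ≠ r := by omega
      have hl : l < a.length := by omega
      have h1 : ((a.set l (Char.ofNat ((a.getD l ' ').toNat - 1))).getD r ' ').toNat
          = (a.getD r ' ').toNat := by rw [pv_getD_set_ne hlr]
      have h2 : ((a.set l (Char.ofNat ((a.getD l ' ').toNat - 1))).getD l ' ').toNat
          = (Char.ofNat ((a.getD l ' ').toNat - 1)).toNat := by rw [pv_getD_set_self hl]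
      have hpos : 1 ≤ (a.getD l ' ').toNat := by
        rename_i hne hlt1 hlt
        have := pv_char_lt.mp hlt.1
        omega
      have h3 : (Char.ofNat ((a.getD l ' ').toNat - 1)).toNat ≤ (a.getD l ' ').toNat - 1 :=
        pv_ofNat_le
      omega

-- port of A: `if not s: return 0`, then the loop on a = list(s), l = 0, r = len(a) - 1, p = 0
def count_palindrome_moves (s : String) : Int :=
  if s.toList = [] then 0
  else pvLoopA s.toList 0 (s.toList.length - 1) 0

-- ===== PORT B =====
-- B's `for i in range(n // 2)` loop with its locals x, y, lo, hi and early return -1.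
def pvLoopB (cs : List Char) (n i : Nat) (t : Int) : Int :=
  if _h : i < n / 2 then
    let x := cs.getD i ' '
    let y := cs.getD (n - 1 - i) ' '
    let lo := if x ≤ y then x else y
    let hi := if x ≤ y then y else x
    if lo < 'a' ∧ 'a' ≤ hi then -1
    else pvLoopB cs n (i + 1) (t + ((hi.toNat : Int) - (lo.toNat : Int)))
  else t
termination_by n / 2 - i

def count_palindrome_moves_alt (s : String) : Int :=
  pvLoopB s.toList s.toList.length 0 0

-- ===== PRECONDITION & SPEC =====
def Spec_count_palindrome_moves (s : String) (out : Int) : Prop := out = count_palindrome_moves_alt s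
instance (s : String) (out : Int) : Decidable (Spec_count_palindrome_moves s out) := by unfold Spec_count_palindrome_moves; infer_instance

-- ===== CLAIM (what is proved, stated in full; the proofs are below) =====
def Claim_equal_count_palindrome_moves : Prop := ∀ (s : String), Dom_count_palindrome_moves s → Spec_count_palindrome_moves s (count_palindrome_moves s)

-- ===== LEMMAS AND PROOFS =====

theorem pv_char_le {a b : Char} : a ≤ b ↔ a.toNat ≤ b.toNat :=
  Iff.trans Char.le_def UInt32.le_iff_toNat_le

theorem pv_char_eq {a b : Char} : a = b ↔ a.toNat = b.toNat := by
  constructor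
  · intro h; rw [h]
  · intro h; exact Char.ext (UInt32.toNat_inj.mp h)

theorem pv_a_toNat : ('a').toNat = 97 := rfl

theorem pv_ofNat_toNat {n : Nat} (h : n ≤ 126) : (Char.ofNat n).toNat = n := by
  rw [Char.toNat_ofNat, if_pos (Or.inl (by omega))]

theorem pv_getD_mem {a : List Char} {i : Nat} (h : i < a.length) (d : Char) : a.getD i d ∈ a := by
  simp [List.getD, List.getElem?_eq_getElem h, List.getElem_mem]

theorem pv_set_getD_self {a : List Char} {i : Nat} {d v : Char}
    (h : i < a.length) (hv : a.getD i d = v) : a.set i v = a := by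
  subst hv
  simp [List.getD, List.getElem?_eq_getElem h, List.set_getElem_self]

theorem pvLoopA_resolve (k : Nat) : ∀ (a : List Char) (l r : Nat) (p : Int),
    (a.getD l ' ').toNat + (a.getD r ' ').toNat ≤ k → l < r → r < a.length →
    (∀ c ∈ a, c.toNat ≤ 126) →
    pvLoopA a l r p =
      if (if a.getD l ' ' ≤ a.getD r ' ' then a.getD l ' ' else a.getD r ' ') < 'a'
         ∧ 'a' ≤ (if a.getD l ' ' ≤ a.getD r ' ' then a.getD r ' ' else a.getD l ' ') then -1
      else pvLoopA
        ((a.set r (if a.getD l ' ' ≤ a.getD r ' ' then a.getD l ' ' else a.getD r ' ')).set l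
          (if a.getD l ' ' ≤ a.getD r ' ' then a.getD l ' ' else a.getD r ' '))
        (l + 1) (r - 1)
        (p + (((if a.getD l ' ' ≤ a.getD r ' ' then a.getD r ' ' else a.getD l ' ').toNat : Int)
              - ((if a.getD l ' ' ≤ a.getD r ' ' then a.getD l ' ' else a.getD r ' ').toNat : Int))) := by
    induction k using Nat.strong_induction_on with
  | _ k ih =>
    intro a l r p hsum hlr hr hch
    have hl : l < a.length := by omega
    have hlne : l ≠ r := by omega
    have hcl126 : (a.getD l ' ').toNat ≤ 126 := hch _ (pv_getD_mem hl ' ')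
    have hcr126 : (a.getD r ' ').toNat ≤ 126 := hch _ (pv_getD_mem hr ' ')
    rw [pvLoopA, dif_pos hr, dif_pos hlr]
    set cl := a.getD l ' ' with hcldef
    set cr := a.getD r ' ' with hcrdef
    by_cases hcc : cl = cr
    · have hle : cl ≤ cr := le_of_eq hcc
      rw [if_pos hcc]
      simp only [if_pos hle]
      rw [if_neg (by rintro ⟨h1, h2⟩
                     have e := pv_char_eq.mp hcc
                     have := pv_char_lt.mp h1
                     have := pv_char_le.mp h2
                     omega)]
      rw [pv_set_getD_self hr hcc.symm, pv_set_getD_self hl hcldef.symm]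
      rw [hcc]
      norm_num
    · rcases lt_or_gt_of_ne hcc with hlt | hgt
      · -- cl < cr : A decrements the right character
        have hle : cl ≤ cr := le_of_lt hlt
        have hltN : cl.toNat < cr.toNat := pv_char_lt.mp hlt
        simp only [if_pos hle]
        rw [if_neg hcc]
        by_cases hcra : cr = 'a'
        · rw [if_neg (by rintro ⟨_, h⟩; exact h hcra),
              if_neg (by rintro ⟨h, _⟩
                         have := pv_char_lt.mp h; omega)]
          rw [if_pos ⟨by rw [pv_char_lt]
                         have h9 := pv_char_eq.mp hcra
                         rw [pv_a_toNat] at h9 ⊢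
                         omega,
                      le_of_eq hcra.symm⟩]
        · rw [if_pos ⟨hlt, hcra⟩]
          have hRpos : 1 ≤ cr.toNat := by omega
          have hc' : (Char.ofNat (cr.toNat - 1)).toNat = cr.toNat - 1 :=
            pv_ofNat_toNat (by omega)
          have e1 : (a.set r (Char.ofNat (cr.toNat - 1))).getD l ' ' = cl :=
            pv_getD_set_ne (Ne.symm hlne) _ _
          have e2 : (a.set r (Char.ofNat (cr.toNat - 1))).getD r ' ' = Char.ofNat (cr.toNat - 1) :=
            pv_getD_set_self hr _ _
          rw [ih (cl.toNat + (Char.ofNat (cr.toNat - 1)).toNat)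
              (by rw [hc']; omega)
              (a.set r (Char.ofNat (cr.toNat - 1))) l r (p + 1)
              (by rw [e1, e2])
              hlr (by simpa using hr)
              (by intro c hc
                  rcases List.mem_or_eq_of_mem_set hc with hcm | hcm
                  · exact hch _ hcm
                  · rw [hcm, hc']; omega)]
          simp only [e1, e2]
          have hle' : cl ≤ Char.ofNat (cr.toNat - 1) := pv_char_le.mpr (by rw [hc']; omega)
          simp only [if_pos hle']
          have hne97 : cr.toNat ≠ 97 := fun h => hcra (pv_char_eq.mpr (by rw [h]; rfl))
          by_cases hbad : cl < 'a' ∧ 'a' ≤ cr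
          · rw [if_pos hbad,
                if_pos ⟨hbad.1, pv_char_le.mpr (by
                  have := pv_char_le.mp hbad.2
                  rw [hc']
                  simp only [pv_a_toNat] at this ⊢
                  omega)⟩]
          · rw [if_neg (by rintro ⟨h1, h2⟩
                           exact hbad ⟨h1, pv_char_le.mpr (by
                             have := pv_char_le.mp h2
                             rw [hc'] at this
                             simp only [pv_a_toNat] at this ⊢
                             omega)⟩),
                if_neg hbad]
            rw [List.set_set]
            rw [show p + 1 + (((Char.ofNat (cr.toNat - 1)).toNat : Int) - (cl.toNat : Int))
                  = p + ((cr.toNat : Int) - (cl.toNat : Int)) by rw [hc']; omega]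
      · -- cr < cl : A decrements the left character
        have hnle : ¬ cl ≤ cr := not_le.mpr hgt
        have hgtN : cr.toNat < cl.toNat := pv_char_lt.mp hgt
        simp only [if_neg hnle]
        rw [if_neg hcc, if_neg (by rintro ⟨h, _⟩
                                   have := pv_char_lt.mp h; omega)]
        by_cases hcla : cl = 'a'
        · rw [if_neg (by rintro ⟨_, h⟩; exact h hcla)]
          rw [if_pos ⟨by rw [pv_char_lt]
                         have h9 := pv_char_eq.mp hcla
                         rw [pv_a_toNat] at h9 ⊢
                         omega,
                      le_of_eq hcla.symm⟩]
        · rw [if_pos ⟨hgt, hcla⟩]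
          have hLpos : 1 ≤ cl.toNat := by omega
          have hc'' : (Char.ofNat (cl.toNat - 1)).toNat = cl.toNat - 1 :=
            pv_ofNat_toNat (by omega)
          have e1 : (a.set l (Char.ofNat (cl.toNat - 1))).getD r ' ' = cr :=
            pv_getD_set_ne hlne _ _
          have e2 : (a.set l (Char.ofNat (cl.toNat - 1))).getD l ' ' = Char.ofNat (cl.toNat - 1) :=
            pv_getD_set_self hl _ _
          rw [ih ((Char.ofNat (cl.toNat - 1)).toNat + cr.toNat)
              (by rw [hc'']; omega)
              (a.set l (Char.ofNat (cl.toNat - 1))) l r (p + 1)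
              (by rw [e1, e2])
              hlr (by simpa using hr)
              (by intro c hc
                  rcases List.mem_or_eq_of_mem_set hc with hcm | hcm
                  · exact hch _ hcm
                  · rw [hcm, hc'']; omega)]
          simp only [e1, e2]
          have hgec : cr.toNat ≤ (Char.ofNat (cl.toNat - 1)).toNat := by rw [hc'']; omega
          have hminEq : (if Char.ofNat (cl.toNat - 1) ≤ cr then Char.ofNat (cl.toNat - 1) else cr)
              = cr := by
            split
            · exact le_antisymm (by assumption) (pv_char_le.mpr hgec)
            · rfl
          have hmaxT : (if Char.ofNat (cl.toNat - 1) ≤ cr then cr else Char.ofNat (cl.toNat - 1)).toNat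
              = cl.toNat - 1 := by
            split
            · rw [← le_antisymm (by assumption) (pv_char_le.mpr hgec), hc'']
            · rw [hc'']
          have hne97 : cl.toNat ≠ 97 := fun h => hcla (pv_char_eq.mpr (by rw [h]; rfl))
          rw [hminEq]
          by_cases hbad : cr < 'a' ∧ 'a' ≤ cl
          · rw [if_pos ⟨hbad.1, pv_char_le.mpr (by
                  have := pv_char_le.mp hbad.2
                  rw [hmaxT]
                  simp only [pv_a_toNat] at this ⊢
                  omega)⟩,
                if_pos hbad]
          · rw [if_neg (by rintro ⟨h1, h2⟩
                           exact hbad ⟨h1, pv_char_le.mpr (by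
                             have := pv_char_le.mp h2
                             rw [hmaxT] at this
                             simp only [pv_a_toNat] at this ⊢
                             omega)⟩),
                if_neg hbad]
            rw [List.set_comm _ _ hlne, List.set_set]
            rw [show p + 1 + (((if Char.ofNat (cl.toNat - 1) ≤ cr then cr
                    else Char.ofNat (cl.toNat - 1)).toNat : Int) - (cr.toNat : Int))
                  = p + ((cl.toNat : Int) - (cr.toNat : Int)) by rw [hmaxT]; omega]

-- pvLoopB reads only positions j and n-1-j for i ≤ j < n/2
theorem pvLoopB_frame (k : Nat) : ∀ (a b : List Char) (n i : Nat) (t : Int),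
    n / 2 - i ≤ k →
    (∀ j, i ≤ j → j < n / 2 →
      a.getD j ' ' = b.getD j ' ' ∧ a.getD (n - 1 - j) ' ' = b.getD (n - 1 - j) ' ') →
    pvLoopB a n i t = pvLoopB b n i t := by
  induction k with
  | zero =>
    intro a b n i t hk hagree
    rw [pvLoopB, pvLoopB, dif_neg (by omega), dif_neg (by omega)]
  | succ k ih =>
    intro a b n i t hk hagree
    by_cases hi : i < n / 2
    · obtain ⟨e1, e2⟩ := hagree i le_rfl hi
      rw [pvLoopB, pvLoopB, dif_pos hi, dif_pos hi]
      simp only [e1, e2]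
      split <;> split
      · rfl
      · exact ih a b n (i + 1) _ (by omega) (fun j hj hj2 => hagree j (by omega) hj2)
      · rfl
      · exact ih a b n (i + 1) _ (by omega) (fun j hj hj2 => hagree j (by omega) hj2)
    · rw [pvLoopB, pvLoopB, dif_neg hi, dif_neg hi]

-- the main correspondence between A's loop and B's loop
theorem pvLoopAB (k : Nat) : ∀ (a : List Char) (l : Nat) (p : Int),
    a.length / 2 - l ≤ k → (∀ c ∈ a, c.toNat ≤ 126) → 1 ≤ a.length →
    pvLoopA a l (a.length - 1 - l) p = pvLoopB a a.length l p := by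
  induction k with
  | zero =>
    intro a l p hk hch hlen
    rw [pvLoopA, pvLoopB, dif_neg (show ¬ l < a.length / 2 by omega)]
    split
    · rw [dif_neg (show ¬ l < a.length - 1 - l by omega)]
    · rfl
  | succ k ih =>
    intro a l p hk hch hlen
    by_cases hl2 : l < a.length / 2
    · have hlr : l < a.length - 1 - l := by omega
      have hr : a.length - 1 - l < a.length := by omega
      have hm : (if a.getD l ' ' ≤ a.getD (a.length - 1 - l) ' ' then a.getD l ' '
          else a.getD (a.length - 1 - l) ' ').toNat ≤ 126 := by
        split
        · exact hch _ (pv_getD_mem (by omega) ' ')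
        · exact hch _ (pv_getD_mem hr ' ')
      rw [pvLoopA_resolve ((a.getD l ' ').toNat + (a.getD (a.length - 1 - l) ' ').toNat)
        a l (a.length - 1 - l) p le_rfl hlr hr hch]
      rw [pvLoopB, dif_pos hl2]
      simp only []
      by_cases hbad : (if a.getD l ' ' ≤ a.getD (a.length - 1 - l) ' ' then a.getD l ' '
            else a.getD (a.length - 1 - l) ' ') < 'a'
          ∧ 'a' ≤ (if a.getD l ' ' ≤ a.getD (a.length - 1 - l) ' '
            then a.getD (a.length - 1 - l) ' ' else a.getD l ' ')
      · rw [if_pos hbad, if_pos hbad]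
      · rw [if_neg hbad, if_neg hbad]
        set m := (if a.getD l ' ' ≤ a.getD (a.length - 1 - l) ' ' then a.getD l ' '
          else a.getD (a.length - 1 - l) ' ') with hmdef
        set a2 := ((a.set (a.length - 1 - l) m).set l m) with ha2def
        have hlen2 : a2.length = a.length := by
          rw [ha2def]; simp
        have hch2 : ∀ c ∈ a2, c.toNat ≤ 126 := by
          intro c hc
          rcases List.mem_or_eq_of_mem_set hc with hc' | hc'
          · rcases List.mem_or_eq_of_mem_set hc' with hc'' | hc''
            · exact hch _ hc''
            · rw [hc'']; exact hm
          · rw [hc']; exact hm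
        have hco : a.length - 1 - l - 1 = a2.length - 1 - (l + 1) := by
          rw [hlen2]; omega
        rw [hco]
        rw [ih a2 (l + 1) _ (by rw [hlen2]; omega) hch2 (by rw [hlen2]; omega)]
        rw [hlen2]
        exact pvLoopB_frame (a.length / 2) a2 a a.length (l + 1) _ (by omega)
          (fun j hj hj2 => by
            constructor
            · rw [ha2def, pv_getD_set_ne (show l ≠ j by omega),
                pv_getD_set_ne (show a.length - 1 - l ≠ j by omega)]
            · rw [ha2def, pv_getD_set_ne (show l ≠ a.length - 1 - j by omega),
                pv_getD_set_ne (show a.length - 1 - l ≠ a.length - 1 - j by omega)])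
    · rw [pvLoopA, pvLoopB, dif_neg hl2]
      split
      · rw [dif_neg (show ¬ l < a.length - 1 - l by omega)]
      · rfl

-- ===== VERDICT (by name: the statement is the Claim_ definition above) =====
theorem count_palindrome_moves_spec : Claim_equal_count_palindrome_moves := by
  intro s hdom
  unfold Spec_count_palindrome_moves count_palindrome_moves count_palindrome_moves_alt
  have hch : ∀ c ∈ s.toList, c.toNat ≤ 126 := by
    intro c hc
    have := List.all_eq_true.mp hdom c hc
    simp [pvDomChar] at this
    omega
  by_cases hnil : s.toList = []
  · rw [if_pos hnil, hnil]
    rw [pvLoopB]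
    norm_num
  · rw [if_neg hnil]
    exact pvLoopAB (s.toList.length / 2) s.toList 0 0 (by omega) hch
      (List.length_pos_of_ne_nil hnil)
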